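-- pv_equiv track=rewrite | github.com/MB-2-jpg/Research-articles-Visualisation | visu-recherche/Pipelines_finalisés/treemap.py | vocabularisation
-- ===== SOURCE A (Python) =====
-- une_lettre_digit = ['a', 'b', 'c', 'd', 'e', 'f', 'g', 'h', 'i', 'j', 'k', 'l', 'm',
--      'n', 'o', 'p', 'q', 'r', 's', 't', 'u', 'v', 'w', 'x', 'y', 'z', '0', '1', '2', '3', '4', '5', '6', '7', '8', '9' ]
--
-- def vocabularisation(tokens): #tokens est le résultat de la tokenisation du texte
--     vocab_occ = {}
--     liste_mots=[]
--     for elt in tokens :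
--         if elt.casefold() in vocab_occ :
--             vocab_occ[elt.casefold()] += 1
--         elif elt.casefold() not in une_lettre_digit:
--             vocab_occ[elt.casefold()] = 1
--             liste_mots.append(elt.casefold())
--     return liste_mots,vocab_occ
-- ===== SOURCE B (Python) =====
-- une_lettre_digit = ['a', 'b', 'c', 'd', 'e', 'f', 'g', 'h', 'i', 'j', 'k', 'l', 'm',
--      'n', 'o', 'p', 'q', 'r', 's', 't', 'u', 'v', 'w', 'x', 'y', 'z', '0', '1', '2', '3', '4', '5', '6', '7', '8', '9' ]
--
-- def vocabularisation(tokens):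
--     # staged: casefold+filter, then ordered dedup, then count each distinct word
--     words = [t.casefold() for t in tokens if t.casefold() not in une_lettre_digit]
--     liste_mots = list(dict.fromkeys(words))
--     return liste_mots, {w: words.count(w) for w in liste_mots}
-- ===== Notes on version B (the rewrite author's own statement) =====
-- stated objective: alternative
-- what changed: B replaces A's single pass with stateful if/elif dict-and-list updates by three staged declarative passes: a comprehension that casefolds and filters the tokens, an ordered dedup (dict.fromkeys) for the word list, and a per-distinct-word words.count scan for the occurrence dict.
import Mathlib
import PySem

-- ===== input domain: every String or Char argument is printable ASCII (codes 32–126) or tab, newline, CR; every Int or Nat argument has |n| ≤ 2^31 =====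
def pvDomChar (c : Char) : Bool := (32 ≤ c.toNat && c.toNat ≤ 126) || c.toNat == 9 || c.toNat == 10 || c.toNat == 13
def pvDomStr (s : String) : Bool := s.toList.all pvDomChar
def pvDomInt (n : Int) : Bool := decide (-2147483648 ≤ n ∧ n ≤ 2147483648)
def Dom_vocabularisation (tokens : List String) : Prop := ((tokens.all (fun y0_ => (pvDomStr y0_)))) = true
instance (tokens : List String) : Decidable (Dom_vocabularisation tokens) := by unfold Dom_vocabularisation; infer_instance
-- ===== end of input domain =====

-- B replaces A's stateful single pass (if/elif dict-and-list updates) by three staged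
-- declarative passes: casefold+filter, ordered dedup, per-distinct-word count; objective: alternative.
-- `str.casefold` is ported as PySem.Str.lower, exact on the ASCII domain Dom_ guarantees.

-- ===== PORT A =====
def uneLettreDigit : List String := ["a", "b", "c", "d", "e", "f", "g", "h", "i", "j", "k", "l", "m",
     "n", "o", "p", "q", "r", "s", "t", "u", "v", "w", "x", "y", "z", "0", "1", "2", "3", "4", "5", "6", "7", "8", "9"]

-- loop body of A: state = (vocab_occ, liste_mots)
def vocabStepA (st : PySem.Dict String Int × List String) (elt : String) :
    PySem.Dict String Int × List String :=
  let c := PySem.Str.lower elt   -- elt.casefold(), exact on ASCII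
  if st.1.contains c then (st.1.modify c 0 (· + 1), st.2)
  else if uneLettreDigit.contains c = false then (st.1.insert c 1, st.2 ++ [c])
  else st

def vocabularisation (tokens : List String) : List String × (List (String × Int)) :=
  let st := tokens.foldl vocabStepA (PySem.Dict.empty, [])
  (st.2, st.1.items)

-- ===== PORT B =====
-- words = [t.casefold() for t in tokens if t.casefold() not in une_lettre_digit]
def wordsB (tokens : List String) : List String :=
  tokens.filterMap (fun t =>
    let w := PySem.Str.lower t   -- t.casefold(), exact on ASCII
    if uneLettreDigit.contains w then none else some w)

def vocabularisation_alt (tokens : List String) : List String × (List (String × Int)) :=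
  let words := wordsB tokens
  let listeMots := PySem.List.dedup words            -- list(dict.fromkeys(words))
  (listeMots, listeMots.map (fun w => (w, (PySem.List.count words w : Int))))

-- ===== PRECONDITION & SPEC =====
def Spec_vocabularisation (tokens : List String) (out : List String × (List (String × Int))) : Prop := out = vocabularisation_alt tokens
instance (tokens : List String) (out : List String × (List (String × Int))) : Decidable (Spec_vocabularisation tokens out) := by unfold Spec_vocabularisation; infer_instance

-- ===== CLAIM (what is proved, stated in full; the proofs are below) =====
def Claim_equal_vocabularisation : Prop := ∀ (tokens : List String), Dom_vocabularisation tokens → Spec_vocabularisation tokens (vocabularisation tokens)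

-- ===== LEMMAS AND PROOFS =====

-- A's loop, started from a dict whose keys avoid the single-char list and whose key list is the
-- word accumulator, is Counter's modify-loop over the filtered casefolded words, paired with its keys.
theorem loop_eq : ∀ (tokens : List String) (d : PySem.Dict String Int),
    (∀ k ∈ d.keys, uneLettreDigit.contains k = false) →
    tokens.foldl vocabStepA (d, d.keys) =
      ((wordsB tokens).foldl (fun d x => d.modify x 0 (· + 1)) d,
       ((wordsB tokens).foldl (fun d x => d.modify x 0 (· + 1)) d).keys) := by
  intro tokens
  induction tokens with
  | nil => intro d h; simp [wordsB]
  | cons t rest ih =>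
    intro d hinv
    by_cases hS : uneLettreDigit.contains (PySem.Str.lower t) = true
    · -- single-char token: skipped by both
      have hSm : PySem.Str.lower t ∈ uneLettreDigit := by simpa using hS
      have hdc : d.contains (PySem.Str.lower t) = false := by
        by_contra h
        have hk := (PySem.Dict.contains_iff_mem_keys d _).mp (by simpa using h)
        have := hinv _ hk
        simp [hSm] at this
      have hw : wordsB (t :: rest) = wordsB rest := by simp [wordsB, hSm]
      have hA : vocabStepA (d, d.keys) t = (d, d.keys) := by
        simp [vocabStepA, hdc, hSm]
      rw [List.foldl_cons, hA, hw]
      exact ih d hinv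
    · -- counted token
      have hS' : uneLettreDigit.contains (PySem.Str.lower t) = false := by simpa using hS
      have hSm' : PySem.Str.lower t ∉ uneLettreDigit := by simpa using hS'
      have hw : wordsB (t :: rest) = PySem.Str.lower t :: wordsB rest := by
        simp [wordsB, hSm']
      have hinv' : ∀ k ∈ (d.modify (PySem.Str.lower t) 0 (· + 1)).keys,
          uneLettreDigit.contains k = false := by
        intro k hk
        rw [PySem.Dict.keys_modify] at hk
        rcases (PySem.Dict.mem_keys_insert d _ k _).mp hk with h | h
        · subst h; exact hS'
        · exact hinv _ h
      have hA : vocabStepA (d, d.keys) t =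
          (d.modify (PySem.Str.lower t) 0 (· + 1), (d.modify (PySem.Str.lower t) 0 (· + 1)).keys) := by
        by_cases hdc : d.contains (PySem.Str.lower t) = true
        · simp only [vocabStepA, hdc, if_true]
          rw [PySem.Dict.keys_modify, PySem.Dict.keys_insert_of_contains d _ hdc]
        · have hdc' : d.contains (PySem.Str.lower t) = false := by simpa using hdc
          simp only [vocabStepA, hdc', Bool.false_eq_true, if_false, hS']
          have hmod : d.modify (PySem.Str.lower t) 0 (· + 1) = d.insert (PySem.Str.lower t) 1 := by
            show d.insert _ (d.getD _ 0 + 1) = _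
            rw [PySem.Dict.getD_of_not_contains d _ hdc']
            norm_num
          rw [hmod, PySem.Dict.keys_insert_of_not_contains d _ hdc']
          simp
      rw [List.foldl_cons, hA, hw, List.foldl_cons]
      exact ih _ hinv'

-- ===== VERDICT (by name: the statement is the Claim_ definition above) =====
theorem vocabularisation_spec : Claim_equal_vocabularisation := by
  intro tokens _
  unfold Spec_vocabularisation vocabularisation vocabularisation_alt
  have h := loop_eq tokens PySem.Dict.empty (by simp [PySem.Dict.keys_empty])
  simp only [PySem.Dict.keys_empty] at h
  rw [h, ← PySem.Dict.counter_eq_foldl]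
  simp [PySem.Dict.keys_counter, PySem.Dict.items_counter, PySem.List.dedup_eq_ofList,
    PySem.List.count_eq]
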